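-- pv_equiv track=rewrite | github.com/City-of-Helsinki/text-anonymizer | text_anonymizer/text_anonymizer.py | combine_statistics
-- ===== SOURCE A (Python) =====
-- def combine_statistics(statistics: []):
--     combined_stats = {}
--     for s in statistics:
--         for k in s.keys():
--             if k in combined_stats.keys():
--                 combined_stats[k] += s[k]
--             else:
--                 combined_stats[k] = s[k]
--     return combined_stats
-- ===== SOURCE B (Python) =====
-- def combine_statistics(statistics: []):
--     # gather phase: group every value under its key (first-appearance key order),
--     # reduce phase: sum each key's group
--     groups = {}
--     for s in statistics:
--         for k, v in s.items():
--             groups.setdefault(k, []).append(v)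
--     return {k: sum(vs) for k, vs in groups.items()}
-- ===== Notes on version B (the rewrite author's own statement) =====
-- stated objective: alternative
-- what changed: A streams over every entry keeping running integer totals in the result dict with an add-or-insert branch; B is a gather-then-reduce pass: it first groups all values under their key (lists in first-appearance key order), then sums each group in a final comprehension.
import Mathlib
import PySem

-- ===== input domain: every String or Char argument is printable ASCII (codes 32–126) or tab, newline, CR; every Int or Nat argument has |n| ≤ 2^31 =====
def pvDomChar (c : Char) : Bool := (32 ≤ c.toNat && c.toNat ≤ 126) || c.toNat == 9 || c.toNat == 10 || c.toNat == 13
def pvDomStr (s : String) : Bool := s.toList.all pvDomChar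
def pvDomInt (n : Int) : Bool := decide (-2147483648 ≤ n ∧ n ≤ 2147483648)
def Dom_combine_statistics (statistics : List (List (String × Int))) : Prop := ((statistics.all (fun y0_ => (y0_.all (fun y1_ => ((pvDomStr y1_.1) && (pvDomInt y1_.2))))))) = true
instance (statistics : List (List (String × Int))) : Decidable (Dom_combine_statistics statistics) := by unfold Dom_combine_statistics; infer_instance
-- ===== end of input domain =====

-- B replaces A's streaming add-or-insert accumulation of running totals by a gather-then-reduce pass: group all values per key, then sum each group (objective: alternative, same cost).

-- ===== PORT A =====
-- A: combined_stats = {}; for s in statistics: for k in s.keys(): add/insert.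
def combine_statistics (statistics : List (List (String × Int))) : List (String × Int) :=
  (statistics.foldl
    (fun combined s =>
      (PySem.Dict.mk s).keys.foldl
        (fun c k =>
          if c.contains k then
            c.insert k (c.getD k 0 + (PySem.Dict.mk s).getD k 0)
          else
            c.insert k ((PySem.Dict.mk s).getD k 0))
        combined)
    PySem.Dict.empty).items

-- ===== PORT B =====
-- B: gather phase groups every value under its key (setdefault(k, []).append(v) = modify k [] (· ++ [v])),
-- reduce phase sums each key's group.
def combine_statistics_alt (statistics : List (List (String × Int))) : List (String × Int) :=
  (statistics.foldl
      (fun groups s =>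
        (PySem.Dict.mk s).items.foldl
          (fun g p => g.modify p.1 [] (fun vs => vs ++ [p.2])) groups)
      PySem.Dict.empty).items.map
    (fun kv => (kv.1, kv.2.sum))

-- ===== PRECONDITION & SPEC =====
-- Pre_ excludes inner lists with duplicate keys: they do not represent a Python dict (dict construction
-- collapses duplicates to the last value), so the association-list ports would diverge from the Pythons there.
def Pre_combine_statistics (statistics : List (List (String × Int))) : Prop :=
  ∀ s ∈ statistics, (s.map Prod.fst).Nodup
instance (statistics : List (List (String × Int))) : Decidable (Pre_combine_statistics statistics) := by unfold Pre_combine_statistics; infer_instance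
def pvWitness_combine_statistics : (List (List (String × Int))) :=
  [[("a", 1), ("b", 2)], [("a", 3)]]
def Spec_combine_statistics (statistics : List (List (String × Int))) (out : List (String × Int)) : Prop := out = combine_statistics_alt statistics
instance (statistics : List (List (String × Int))) (out : List (String × Int)) : Decidable (Spec_combine_statistics statistics out) := by unfold Spec_combine_statistics; infer_instance

-- ===== CLAIM (what is proved, stated in full; the proofs are below) =====
def Claim_equal_combine_statistics : Prop := ∀ (statistics : List (List (String × Int))), Dom_combine_statistics statistics → Pre_combine_statistics statistics → Spec_combine_statistics statistics (combine_statistics statistics)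

-- ===== LEMMAS AND PROOFS =====

-- A's two branches perform the same insert (a missing key reads as the default 0).
lemma stepA_merge (s : List (String × Int)) :
    (fun (c : PySem.Dict String Int) k =>
      if c.contains k then
        c.insert k (c.getD k 0 + (PySem.Dict.mk s).getD k 0)
      else
        c.insert k ((PySem.Dict.mk s).getD k 0))
    = fun c k => c.insert k (c.getD k 0 + (PySem.Dict.mk s).getD k 0) := by
  funext c k
  by_cases h : c.contains k = true
  · simp [h]
  · simp only [Bool.not_eq_true] at h
    rw [if_neg (by simp [h]), PySem.Dict.getD_of_not_contains _ _ h, zero_add]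

lemma getD_inner (l : List String) (g : String → Int) (c : PySem.Dict String Int) (k : String) :
    (l.foldl (fun c x => c.insert x (c.getD x 0 + g x)) c).getD k 0
    = c.getD k 0 + ((l.filter (fun x => x == k)).map g).sum := by
  induction l generalizing c with
  | nil => simp
  | cons x t ih =>
    simp only [List.foldl_cons, ih, List.filter_cons]
    rw [PySem.Dict.getD_insert]
    by_cases h : x = k
    · subst h; simp; ring
    · simp [h, Ne.symm h]

lemma filter_beq_of_nodup (l : List String) (k : String) (h : l.Nodup) :
    l.filter (fun x => x == k) = if k ∈ l then [k] else [] := by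
  induction l with
  | nil => simp
  | cons x t ih =>
    simp only [List.nodup_cons] at h
    rw [List.filter_cons]
    by_cases hx : x = k
    · subst hx
      have ht : t.filter (fun a => a == x) = [] := by
        apply List.filter_eq_nil_iff.2
        intro a ha hb
        have hax : a = x := by simpa using hb
        exact h.1 (hax ▸ ha)
      simp [ht]
    · simp [hx, ih h.2, Ne.symm hx]

lemma getD_inner_dict (s : List (String × Int)) (c : PySem.Dict String Int) (k : String)
    (hnd : (s.map Prod.fst).Nodup) :
    ((PySem.Dict.mk s).keys.foldl
        (fun c x => c.insert x (c.getD x 0 + (PySem.Dict.mk s).getD x 0)) c).getD k 0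
    = c.getD k 0 + (if (PySem.Dict.mk s).contains k then (PySem.Dict.mk s).getD k 0 else 0) := by
  rw [getD_inner]
  have hk : (PySem.Dict.mk s).keys = s.map Prod.fst := by
    simp [PySem.Dict.keys]
  rw [hk, filter_beq_of_nodup _ _ hnd]
  have hc : (PySem.Dict.mk s).contains k = decide (k ∈ s.map Prod.fst) := by
    rw [PySem.Dict.contains_eq_decide_mem_keys, hk]
  by_cases hm : k ∈ s.map Prod.fst <;> simp [hc, hm]

lemma getD_outer (sts : List (List (String × Int))) (c : PySem.Dict String Int) (k : String)
    (hnd : ∀ s ∈ sts, (s.map Prod.fst).Nodup) :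
    (sts.foldl (fun combined s =>
        (PySem.Dict.mk s).keys.foldl
          (fun c x => c.insert x (c.getD x 0 + (PySem.Dict.mk s).getD x 0)) combined) c).getD k 0
    = c.getD k 0
      + (sts.map (fun s => if (PySem.Dict.mk s).contains k then (PySem.Dict.mk s).getD k 0 else 0)).sum := by
  induction sts generalizing c with
  | nil => simp
  | cons s t ih =>
    simp only [List.foldl_cons, List.map_cons, List.sum_cons]
    rw [ih _ (fun s hs => hnd s (List.mem_cons_of_mem _ hs)),
        getD_inner_dict s c k (hnd s List.mem_cons_self)]
    ring

lemma keys_outer (sts : List (List (String × Int))) (c : PySem.Dict String Int) :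
    (sts.foldl (fun combined s =>
        (PySem.Dict.mk s).keys.foldl
          (fun c x => c.insert x (c.getD x 0 + (PySem.Dict.mk s).getD x 0)) combined) c).keys
    = sts.foldl (fun ks s => PySem.Set.update ks (PySem.Dict.mk s).keys) c.keys := by
  induction sts generalizing c with
  | nil => rfl
  | cons s t ih =>
    simp only [List.foldl_cons]
    rw [ih]
    congr 1
    exact PySem.Dict.keys_foldl_insert _ _ _

lemma nodup_outer (sts : List (List (String × Int))) (c : PySem.Dict String Int)
    (h : c.keys.Nodup) :
    (sts.foldl (fun combined s =>
        (PySem.Dict.mk s).keys.foldl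
          (fun c x => c.insert x (c.getD x 0 + (PySem.Dict.mk s).getD x 0)) combined) c).keys.Nodup := by
  induction sts generalizing c with
  | nil => exact h
  | cons s t ih =>
    simp only [List.foldl_cons]
    exact ih _ (PySem.Dict.nodup_keys_foldl_insert _ _ _ h)

lemma set_update_foldl (sts : List (List (String × Int)))
    (g : List (String × Int) → List String) (ks0 : PySem.Set String) :
    sts.foldl (fun ks s => PySem.Set.update ks (g s)) ks0
    = PySem.Set.update ks0 (sts.flatMap g) := by
  induction sts generalizing ks0 with
  | nil => simp [PySem.Set.update]
  | cons s t ih =>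
    rw [List.foldl_cons, ih, List.flatMap_cons]
    simp only [PySem.Set.update, List.foldl_append]

lemma flatMap_map_fst (sts : List (List (String × Int))) :
    sts.flatMap (fun s => s.map Prod.fst) = sts.flatten.map Prod.fst := by
  induction sts with
  | nil => rfl
  | cons s t ih => simp [ih]

lemma per_dict_sum (s : List (String × Int)) (k : String) (hnd : (s.map Prod.fst).Nodup) :
    ((s.filter (fun p => p.1 == k)).map (fun x => x.2)).sum
    = ((PySem.Dict.mk s).get? k).getD 0 := by
  induction s with
  | nil => simp [PySem.Dict.get?]
  | cons a t ih =>
    simp only [List.map_cons, List.nodup_cons] at hnd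
    rw [List.filter_cons, PySem.Dict.get?_mk_cons]
    by_cases h : a.1 = k
    · have hfe : t.filter (fun p => p.1 == k) = [] := by
        apply List.filter_eq_nil_iff.2
        intro p hp hb
        have hpk : p.1 = k := by simpa using hb
        exact hnd.1 (h ▸ hpk ▸ List.mem_map_of_mem hp)
      simp [h, hfe]
    · simp only [beq_iff_eq, h, if_false]
      exact ih hnd.2

lemma if_contains_eq (s : List (String × Int)) (k : String) :
    (if (PySem.Dict.mk s).contains k then (PySem.Dict.mk s).getD k 0 else 0)
    = ((PySem.Dict.mk s).get? k).getD 0 := by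
  rcases hg : (PySem.Dict.mk s).get? k with _ | v
  · have hc : (PySem.Dict.mk s).contains k = false := by
      rw [PySem.Dict.contains_eq_isSome_get?, hg]; rfl
    simp [hc]
  · have hc : (PySem.Dict.mk s).contains k = true := by
      rw [PySem.Dict.contains_eq_isSome_get?, hg]; rfl
    simp [hc, PySem.Dict.getD_eq_get?_getD, hg]

lemma flat_sum (sts : List (List (String × Int))) (k : String) :
    (sts.map (fun s => ((s.filter (fun p => p.1 == k)).map (fun x => x.2)).sum)).sum
    = ((sts.flatten.filter (fun p => p.1 == k)).map (fun x => x.2)).sum := by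
  induction sts with
  | nil => rfl
  | cons s t ih => simp [List.filter_append, ih]

-- ===== VERDICT (by name: the statement is the Claim_ definition above) =====
theorem combine_statistics_spec : Claim_equal_combine_statistics := by
  intro statistics _ hpre
  unfold Spec_combine_statistics combine_statistics combine_statistics_alt
  have hrw : statistics.foldl
      (fun combined s =>
        (PySem.Dict.mk s).keys.foldl
          (fun c k =>
            if c.contains k then
              c.insert k (c.getD k 0 + (PySem.Dict.mk s).getD k 0)
            else
              c.insert k ((PySem.Dict.mk s).getD k 0)) combined)
      PySem.Dict.empty
      = statistics.foldl
          (fun combined s =>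
            (PySem.Dict.mk s).keys.foldl
              (fun c x => c.insert x (c.getD x 0 + (PySem.Dict.mk s).getD x 0)) combined)
          PySem.Dict.empty :=
    PySem.List.foldl_congr_mem _ _ _ _ (fun acc s _ => by rw [stepA_merge s])
  rw [hrw]
  set d := statistics.foldl
      (fun combined s =>
        (PySem.Dict.mk s).keys.foldl
          (fun c x => c.insert x (c.getD x 0 + (PySem.Dict.mk s).getD x 0)) combined)
      PySem.Dict.empty with hd
  -- B's grouping loop, flattened
  have hBfold : statistics.foldl
      (fun groups s =>
        (PySem.Dict.mk s).items.foldl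
          (fun g p => g.modify p.1 [] (fun vs => vs ++ [p.2])) groups)
      PySem.Dict.empty
      = statistics.flatten.foldl
          (fun g p => g.modify p.1 [] (fun vs => vs ++ [p.2])) PySem.Dict.empty :=
    List.foldl_flatten.symm
  rw [hBfold]
  set G := statistics.flatten.foldl
      (fun g p => g.modify p.1 [] (fun vs => vs ++ [p.2])) PySem.Dict.empty with hG
  have hAnd : d.keys.Nodup := nodup_outer _ _ PySem.Dict.nodup_keys_empty
  have hGnd : G.keys.Nodup :=
    PySem.Dict.nodup_keys_foldl_modify_key _ _ _ _ _ PySem.Dict.nodup_keys_empty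
  rw [PySem.Dict.items_eq_map_keys d hAnd 0, PySem.Dict.items_eq_map_keys G hGnd [],
      List.map_map]
  have hkeys : d.keys = G.keys := by
    rw [hd, keys_outer, hG, PySem.Dict.keys_foldl_modify_key]
    have h1 : (PySem.Dict.empty : PySem.Dict String Int).keys = PySem.Set.empty := rfl
    have h2 : (PySem.Dict.empty : PySem.Dict String (List Int)).keys = PySem.Set.empty := rfl
    rw [h1, h2, set_update_foldl statistics (fun s => (PySem.Dict.mk s).keys)]
    have : statistics.flatMap (fun s => (PySem.Dict.mk s).keys)
        = statistics.flatten.map Prod.fst := flatMap_map_fst statistics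
    rw [this]
  rw [hkeys]
  apply List.map_congr_left
  intro k _
  simp only [Function.comp]
  congr 1
  have hGget : G.getD k [] = (statistics.flatten.filter (fun p => p.1 == k)).map (fun x => x.2) := by
    rw [hG, PySem.Dict.getD_foldl_modify_append]
    simp [PySem.Dict.getD_empty]
  rw [hGget, hd, getD_outer _ _ _ hpre, ← flat_sum]
  have hmap : statistics.map
      (fun s => if (PySem.Dict.mk s).contains k then (PySem.Dict.mk s).getD k 0 else 0)
      = statistics.map
          (fun s => ((s.filter (fun p => p.1 == k)).map (fun x => x.2)).sum) :=
    List.map_congr_left (fun s hs => by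
      rw [if_contains_eq, ← per_dict_sum s k (hpre s hs)])
  rw [hmap]
  simp [PySem.Dict.getD_empty]
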